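-- pv_equiv track=rewrite | github.com/yqf66/HFOCUS | focus_localizer.py | _sample_indices
-- ===== SOURCE A (Python) =====
-- def _sample_indices(start_idx: int, end_idx: int, step: int, anchors: list[int] | None = None) -> list[int]:
--     if end_idx < start_idx:
--         return []
--     indices = list(range(start_idx, end_idx + 1, max(1, step)))
--     if anchors:
--         for a in anchors:
--             if start_idx <= a <= end_idx:
--                 indices.append(int(a))
--     return sorted(set(indices))
-- ===== SOURCE B (Python) =====
-- def _sample_indices(start_idx: int, end_idx: int, step: int, anchors: list[int] | None = None) -> list[int]:
--     if end_idx < start_idx: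
--         return []
--     st = max(1, step)
--     base = range(start_idx, end_idx + 1, st)
--     # dedupe the in-bounds anchors, keep only those not already on the step grid, sorted
--     cand = {a for a in (anchors or []) if start_idx <= a <= end_idx}
--     extras = sorted(a for a in cand if (a - start_idx) % st != 0)
--     # splice each anchor into the (already sorted) range at its arithmetic position
--     out = []
--     i = 0
--     for a in extras:
--         j = (a - start_idx) // st + 1   # number of grid points below a
--         out.extend(base[i:j])
--         out.append(a)
--         i = j
--     out.extend(base[i:])
--     return out
-- ===== Notes on version B (the rewrite author's own statement) =====
-- stated objective: alternative
-- what changed: Instead of appending in-bounds anchors to the materialized range list and running sorted(set(...)) over all n+m elements, B dedupes/sorts only the off-grid in-bounds anchors and splices them into the already-sorted range at arithmetically computed positions.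
import Mathlib
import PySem

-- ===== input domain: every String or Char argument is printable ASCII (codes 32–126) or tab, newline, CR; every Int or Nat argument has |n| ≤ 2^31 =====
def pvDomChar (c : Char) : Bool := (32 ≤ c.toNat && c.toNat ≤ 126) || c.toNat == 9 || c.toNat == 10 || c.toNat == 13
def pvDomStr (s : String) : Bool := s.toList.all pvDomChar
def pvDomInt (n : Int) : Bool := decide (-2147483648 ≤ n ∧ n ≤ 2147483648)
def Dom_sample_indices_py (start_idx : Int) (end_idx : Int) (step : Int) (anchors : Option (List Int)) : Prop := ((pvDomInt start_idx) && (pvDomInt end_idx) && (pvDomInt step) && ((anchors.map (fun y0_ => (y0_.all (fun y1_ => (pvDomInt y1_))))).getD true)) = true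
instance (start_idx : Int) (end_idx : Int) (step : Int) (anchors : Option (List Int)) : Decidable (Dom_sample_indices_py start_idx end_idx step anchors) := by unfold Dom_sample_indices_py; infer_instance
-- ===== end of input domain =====

-- B replaces A's sorted(set(range ++ in-bounds anchors)) by splicing the deduped, sorted, off-grid
-- in-bounds anchors into the already-sorted range at arithmetically computed positions (alternative algorithm).


-- ===== PORT A =====
def sample_indices_py (start_idx : Int) (end_idx : Int) (step : Int) (anchors : Option (List Int)) : List Int :=
  if end_idx < start_idx then []
  else
    let indices := PySem.List.pyRange start_idx (end_idx + 1) (max 1 step)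
    let indices :=
      match anchors with
      | none => indices
      | some l =>
        if l = [] then indices
        else l.foldl (fun acc a =>
          if (decide (start_idx ≤ a) && decide (a ≤ end_idx)) = true then acc ++ [a] else acc) indices
    PySem.List.sorted (PySem.Set.ofList indices) (fun x => x)

-- ===== PORT B =====
def sample_indices_py_alt (start_idx : Int) (end_idx : Int) (step : Int) (anchors : Option (List Int)) : List Int :=
  if end_idx < start_idx then []
  else
    let st := max 1 step
    let base := PySem.List.pyRange start_idx (end_idx + 1) st
    let cand := PySem.Set.ofList ((anchors.getD []).filter (fun a =>
      decide (start_idx ≤ a) && decide (a ≤ end_idx)))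
    let extras := PySem.List.sorted
      (cand.filter (fun a => !(PySem.Int.mod (a - start_idx) st == 0)))
      (fun x => x)
    let r := extras.foldl (fun (p : List Int × Int) a =>
      let j := PySem.Int.floordiv (a - start_idx) st + 1
      (p.1 ++ PySem.List.slice base (some p.2) (some j) ++ [a], j)) ([], 0)
    r.1 ++ PySem.List.slice base (some r.2) none

-- ===== PRECONDITION & SPEC =====
def Spec_sample_indices_py (start_idx : Int) (end_idx : Int) (step : Int) (anchors : Option (List Int)) (out : List Int) : Prop := out = sample_indices_py_alt start_idx end_idx step anchors
instance (start_idx : Int) (end_idx : Int) (step : Int) (anchors : Option (List Int)) (out : List Int) : Decidable (Spec_sample_indices_py start_idx end_idx step anchors out) := by unfold Spec_sample_indices_py; infer_instance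

-- ===== CLAIM (what is proved, stated in full; the proofs are below) =====
def Claim_equal_sample_indices_py : Prop := ∀ (start_idx : Int) (end_idx : Int) (step : Int) (anchors : Option (List Int)), Dom_sample_indices_py start_idx end_idx step anchors → Spec_sample_indices_py start_idx end_idx step anchors (sample_indices_py start_idx end_idx step anchors)

-- ===== LEMMAS AND PROOFS =====

-- proof-only helper: merge of two sorted lists (the mathematical shape of B's splice loop)
def pvMerge : List Int → List Int → List Int
  | [], ys => ys
  | x :: xs, [] => x :: xs
  | x :: xs, y :: ys =>
    if x < y then x :: pvMerge xs (y :: ys) else y :: pvMerge (x :: xs) ys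
termination_by xs ys => xs.length + ys.length

theorem pvMerge_nil_right (xs : List Int) : pvMerge xs [] = xs := by
  cases xs <;> simp [pvMerge]

theorem pvMerge_mem (xs ys : List Int) (z : Int) :
    z ∈ pvMerge xs ys ↔ z ∈ xs ∨ z ∈ ys := by
  induction xs, ys using pvMerge.induct with
  | case1 ys => simp [pvMerge]
  | case2 x xs => simp [pvMerge]
  | case3 x xs y ys h ih => simp only [pvMerge, if_pos h, List.mem_cons, ih]; tauto
  | case4 x xs y ys h ih => simp only [pvMerge, if_neg h, List.mem_cons, ih]; tauto

theorem pvMerge_pairwise (xs ys : List Int)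
    (hx : xs.Pairwise (· < ·)) (hy : ys.Pairwise (· < ·))
    (hd : ∀ z ∈ xs, z ∉ ys) :
    (pvMerge xs ys).Pairwise (· < ·) := by
  induction xs, ys using pvMerge.induct with
  | case1 ys => simpa [pvMerge] using hy
  | case2 x xs => simpa [pvMerge] using hx
  | case3 x xs y ys h ih =>
    rw [List.pairwise_cons] at hx
    simp only [pvMerge, h, if_true, List.pairwise_cons]
    refine ⟨?_, ih hx.2 hy (fun z hz => hd z (List.mem_cons_of_mem _ hz))⟩
    intro z hz
    rcases (pvMerge_mem xs (y :: ys) z).1 hz with hz | hz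
    · exact hx.1 z hz
    · rcases List.mem_cons.1 hz with rfl | hz
      · exact h
      · rw [List.pairwise_cons] at hy
        exact lt_trans h (hy.1 z hz)
  | case4 x xs y ys h ih =>
    rw [List.pairwise_cons] at hy
    simp only [pvMerge, h, if_false, List.pairwise_cons]
    have hyx : y < x := by
      have hne : x ≠ y := fun he => hd x (List.mem_cons_self) (he ▸ List.mem_cons_self)
      omega
    refine ⟨?_, ih hx hy.2 (fun z hz => fun hzys => hd z hz (List.mem_cons_of_mem _ hzys))⟩
    intro z hz
    rcases (pvMerge_mem (x :: xs) ys z).1 hz with hz | hz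
    · rcases List.mem_cons.1 hz with rfl | hz
      · exact hyx
      · rw [List.pairwise_cons] at hx
        exact lt_trans hyx (hx.1 z hz)
    · exact hy.1 z hz

theorem pvMerge_split (u v rest : List Int) (a : Int)
    (hu : ∀ x ∈ u, x < a) (hv : ∀ y ∈ v, a < y) :
    pvMerge (u ++ v) (a :: rest) = u ++ a :: pvMerge v rest := by
  induction u with
  | nil =>
    cases v with
    | nil => simp [pvMerge]
    | cons y v' =>
      have : ¬ y < a := not_lt_of_gt (hv y List.mem_cons_self)
      simp [pvMerge, this]
  | cons x u' ih =>
    have hxa : x < a := hu x List.mem_cons_self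
    simp only [List.cons_append, pvMerge, if_pos hxa]
    rw [ih (fun z hz => hu z (List.mem_cons_of_mem _ hz))]

theorem pyRange_pairwise_lt_of_pos (a b : Int) {s : Int} (hs : 0 < s) :
    (PySem.List.pyRange a b s).Pairwise (· < ·) := by
  rw [PySem.List.pyRange_of_pos a b hs]
  rw [List.pairwise_map]
  refine List.pairwise_lt_range.imp ?_
  intro i j (hij : i < j)
  have : (i : Int) < (j : Int) := by exact_mod_cast hij
  nlinarith

theorem pyRange_getElem_of_pos (a b : Int) {s : Int} (hs : 0 < s)
    (m : Nat) (hm : m < (PySem.List.pyRange a b s).length) :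
    (PySem.List.pyRange a b s)[m] = a + s * m := by
  simp only [PySem.List.pyRange_of_pos a b hs, List.getElem_map, List.getElem_range]

-- B's fold splices the (sorted, off-grid) extras into any arithmetic-progression list: it is a merge.
theorem pv_splice (start_idx st : Int) (hst : 0 < st) (base : List Int)
    (hbe : ∀ (m : Nat) (h : m < base.length), base[m] = start_idx + st * m)
    (extras : List Int) (hP : extras.Pairwise (· < ·))
    (hnd : ∀ a ∈ extras, start_idx ≤ a ∧ ¬ st ∣ (a - start_idx)) :
    ∀ (out0 : List Int) (i0 : Int), 0 ≤ i0 →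
      (∀ a ∈ extras, i0 ≤ PySem.Int.floordiv (a - start_idx) st + 1) →
      (let r := extras.foldl (fun (p : List Int × Int) a =>
          let j := PySem.Int.floordiv (a - start_idx) st + 1
          (p.1 ++ PySem.List.slice base (some p.2) (some j) ++ [a], j)) (out0, i0)
       r.1 ++ PySem.List.slice base (some r.2) none)
      = out0 ++ pvMerge (base.drop i0.toNat) extras := by
  induction extras with
  | nil =>
    intro out0 i0 h0 _
    simp only [List.foldl_nil, pvMerge_nil_right]
    rw [PySem.List.slice_from _ h0]
  | cons a rest ih =>
    intro out0 i0 h0 hlow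
    have ha := hnd a List.mem_cons_self
    have hndvd : ¬ st ∣ (a - start_idx) := ha.2
    obtain ⟨q, hq_def⟩ : ∃ q, PySem.Int.floordiv (a - start_idx) st = q := ⟨_, rfl⟩
    have hqe : q = (a - start_idx) / st := by
      rw [← hq_def, PySem.Int.floordiv_eq_ediv_of_pos hst]
    have hq0 : 0 ≤ q := by
      rw [hqe]; exact Int.ediv_nonneg (by omega) (le_of_lt hst)
    have hbrack1 : st * q ≤ a - start_idx := by
      rw [hqe, mul_comm]; exact Int.ediv_mul_le _ (by omega)
    have hbrack2 : a - start_idx < st * (q + 1) := by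
      rw [hqe, mul_comm]; exact Int.lt_ediv_add_one_mul_self _ hst
    have hij : i0 ≤ q + 1 := by
      have := hlow a List.mem_cons_self; omega
    have hj0 : (0:Int) ≤ q + 1 := by omega
    have hsplit : base.drop i0.toNat
        = (base.drop i0.toNat).take ((q+1).toNat - i0.toNat) ++ base.drop (q+1).toNat := by
      conv_lhs => rw [← List.take_append_drop ((q+1).toNat - i0.toNat) (base.drop i0.toNat)]
      rw [List.drop_drop]
      congr 2
      omega
    have hu : ∀ x ∈ (base.drop i0.toNat).take ((q+1).toNat - i0.toNat), x < a := by
      intro x hx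
      rw [List.mem_iff_getElem] at hx
      obtain ⟨k, hk, hxk⟩ := hx
      simp only [List.length_take, List.length_drop] at hk
      have hkd : i0.toNat + k < base.length := by omega
      rw [List.getElem_take, List.getElem_drop] at hxk
      rw [← hxk, hbe _ hkd]
      have hmq : ((i0.toNat + k : Nat) : Int) ≤ q := by omega
      have hle : st * ((i0.toNat + k : Nat) : Int) ≤ st * q :=
        mul_le_mul_of_nonneg_left hmq (le_of_lt hst)
      have hne : st * ((i0.toNat + k : Nat) : Int) ≠ a - start_idx :=
        fun he => hndvd ⟨_, he.symm⟩
      omega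
    have hv : ∀ y ∈ base.drop (q+1).toNat, a < y := by
      intro y hy
      rw [List.mem_iff_getElem] at hy
      obtain ⟨k, hk, hyk⟩ := hy
      have hkd : (q+1).toNat + k < base.length := by
        simp only [List.length_drop] at hk; omega
      rw [List.getElem_drop] at hyk
      rw [← hyk, hbe _ hkd]
      have hmq : (q + 1 : Int) ≤ (((q+1).toNat + k : Nat) : Int) := by omega
      have hle : st * (q + 1) ≤ st * (((q+1).toNat + k : Nat) : Int) :=
        mul_le_mul_of_nonneg_left hmq (le_of_lt hst)
      omega
    simp only [List.foldl_cons]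
    rw [hq_def]
    have hP' := (List.pairwise_cons.1 hP).2
    have hlow' : ∀ b ∈ rest, q + 1 ≤ PySem.Int.floordiv (b - start_idx) st + 1 := by
      intro b hb
      have hab : a < b := (List.pairwise_cons.1 hP).1 b hb
      have h4 : q ≤ PySem.Int.floordiv (b - start_idx) st := by
        rw [hqe, PySem.Int.floordiv_eq_ediv_of_pos hst]
        exact Int.ediv_le_ediv hst (by omega)
      omega
    rw [ih hP' (fun b hb => hnd b (List.mem_cons_of_mem _ hb)) _ (q+1) hj0 hlow']
    have hfin : pvMerge (base.drop i0.toNat) (a :: rest)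
        = (base.drop i0.toNat).take ((q+1).toNat - i0.toNat)
          ++ a :: pvMerge (base.drop (q+1).toNat) rest := by
      conv_lhs => rw [hsplit]
      exact pvMerge_split _ _ _ _ hu hv
    rw [hfin, PySem.List.slice_toNat _ h0 hj0]
    simp

-- B's two-stage extras (dedupe in-bounds, then drop on-grid) equals the one-filter form.
theorem pv_extras_eq (start_idx end_idx st : Int) (l : List Int) :
    PySem.List.sorted
      ((PySem.Set.ofList (l.filter (fun a => decide (start_idx ≤ a) && decide (a ≤ end_idx)))).filter
        (fun a => !(PySem.Int.mod (a - start_idx) st == 0))) (fun x => x)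
    = PySem.List.sorted
      (PySem.Set.ofList (l.filter (fun a =>
        decide (start_idx ≤ a) && decide (a ≤ end_idx) && !(PySem.Int.mod (a - start_idx) st == 0))))
      (fun x => x) := by
  apply Eq.symm
  apply PySem.List.sorted_eq_of_perm_of_pairwise_lt
  · have hnd1 : ((PySem.Set.ofList (l.filter (fun a => decide (start_idx ≤ a) && decide (a ≤ end_idx)))).filter
        (fun a => !(PySem.Int.mod (a - start_idx) st == 0))).Nodup :=
      List.Nodup.filter _ (PySem.Set.nodup_ofList _)
    have hp1 := PySem.List.sorted_perm
      ((PySem.Set.ofList (l.filter (fun a => decide (start_idx ≤ a) && decide (a ≤ end_idx)))).filter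
        (fun a => !(PySem.Int.mod (a - start_idx) st == 0))) (fun x : Int => x) false
    refine hp1.trans ?_
    rw [List.perm_ext_iff_of_nodup hnd1 (PySem.Set.nodup_ofList _)]
    intro z
    rw [List.mem_filter, PySem.Set.mem_ofList, PySem.Set.mem_ofList, List.mem_filter, List.mem_filter]
    simp only [Bool.and_eq_true]
    tauto
  · have hle := PySem.List.sorted_pairwise
      ((PySem.Set.ofList (l.filter (fun a => decide (start_idx ≤ a) && decide (a ≤ end_idx)))).filter
        (fun a => !(PySem.Int.mod (a - start_idx) st == 0))) (fun x : Int => x)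
    have hnd : (PySem.List.sorted
        ((PySem.Set.ofList (l.filter (fun a => decide (start_idx ≤ a) && decide (a ≤ end_idx)))).filter
          (fun a => !(PySem.Int.mod (a - start_idx) st == 0))) (fun x : Int => x)).Nodup :=
      (List.Perm.nodup_iff (PySem.List.sorted_perm _ _ _)).2
        (List.Nodup.filter _ (PySem.Set.nodup_ofList _))
    exact (hle.and hnd).imp (fun h => lt_of_le_of_ne h.1 h.2)

theorem pv_merge_form (start_idx end_idx step : Int) (l : List Int) :
    (let st := max 1 step
     let base := PySem.List.pyRange start_idx (end_idx + 1) st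
     let extras := PySem.List.sorted
       (PySem.Set.ofList (l.filter (fun a =>
         decide (start_idx ≤ a) && decide (a ≤ end_idx) && !(PySem.Int.mod (a - start_idx) st == 0))))
       (fun x => x)
     let r := extras.foldl (fun (p : List Int × Int) a =>
       let j := PySem.Int.floordiv (a - start_idx) st + 1
       (p.1 ++ PySem.List.slice base (some p.2) (some j) ++ [a], j)) ([], 0)
     r.1 ++ PySem.List.slice base (some r.2) none)
    = pvMerge (PySem.List.pyRange start_idx (end_idx + 1) (max 1 step))
        (PySem.List.sorted
          (PySem.Set.ofList (l.filter (fun a =>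
            decide (start_idx ≤ a) && decide (a ≤ end_idx) &&
              !(PySem.Int.mod (a - start_idx) (max 1 step) == 0))))
          (fun x => x)) := by
  have hst : (0:Int) < max 1 step := by omega
  have hmem : ∀ a ∈ PySem.List.sorted
      (PySem.Set.ofList (l.filter (fun a =>
        decide (start_idx ≤ a) && decide (a ≤ end_idx) &&
          !(PySem.Int.mod (a - start_idx) (max 1 step) == 0)))) (fun x => x),
      start_idx ≤ a ∧ ¬ (max 1 step) ∣ (a - start_idx) := by
    intro a ha
    rw [PySem.List.mem_sorted, PySem.Set.mem_ofList, List.mem_filter] at ha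
    have h2 := ha.2
    simp only [Bool.and_eq_true, decide_eq_true_eq, Bool.not_eq_eq_eq_not, Bool.not_true,
      beq_eq_false_iff_ne, ne_eq, PySem.Int.mod_eq_zero_iff_dvd] at h2
    tauto
  have h := pv_splice start_idx (max 1 step) hst _
    (pyRange_getElem_of_pos start_idx (end_idx + 1) hst)
    _ (PySem.List.sorted_ofList_pairwise_lt _) hmem [] 0 le_rfl ?_
  · simpa using h
  · intro a ha
    have ha' := hmem a ha
    rw [PySem.Int.floordiv_eq_ediv_of_pos hst]
    have h5 : 0 ≤ (a - start_idx) / (max 1 step) :=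
      Int.ediv_nonneg (by omega) (le_of_lt hst)
    omega

-- A's sorted(set(range ++ in-bounds anchors)) is exactly that merge.
theorem pv_main (start_idx end_idx step : Int) (l : List Int) :
    PySem.List.sorted
      (PySem.Set.ofList
        (l.foldl (fun acc a =>
          if (decide (start_idx ≤ a) && decide (a ≤ end_idx)) = true then acc ++ [a] else acc)
          (PySem.List.pyRange start_idx (end_idx + 1) (max 1 step))))
      (fun x => x)
    = pvMerge (PySem.List.pyRange start_idx (end_idx + 1) (max 1 step))
        (PySem.List.sorted
          (PySem.Set.ofList (l.filter (fun a =>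
            decide (start_idx ≤ a) && decide (a ≤ end_idx) &&
              !(PySem.Int.mod (a - start_idx) (max 1 step) == 0))))
          (fun x => x)) := by
  set st : Int := max 1 step with hst_def
  have hst : 0 < st := by simp [hst_def]
  set base := PySem.List.pyRange start_idx (end_idx + 1) st with hbase
  set extras := PySem.List.sorted
    (PySem.Set.ofList (l.filter (fun a =>
      decide (start_idx ≤ a) && decide (a ≤ end_idx) &&
        !(PySem.Int.mod (a - start_idx) st == 0)))) (fun x => x) with hextras
  have hbaseP : base.Pairwise (· < ·) := pyRange_pairwise_lt_of_pos _ _ hst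
  have hextrasP : extras.Pairwise (· < ·) := PySem.List.sorted_ofList_pairwise_lt _
  have hmem_base : ∀ z : Int, z ∈ base ↔ start_idx ≤ z ∧ z < end_idx + 1 ∧ st ∣ z - start_idx := by
    intro z; exact PySem.List.mem_pyRange_iff_of_pos hst z
  have hmem_extras : ∀ z : Int,
      z ∈ extras ↔ z ∈ l ∧ start_idx ≤ z ∧ z ≤ end_idx ∧ ¬ st ∣ z - start_idx := by
    intro z
    rw [hextras, PySem.List.mem_sorted, PySem.Set.mem_ofList, List.mem_filter]
    simp [PySem.Int.mod_eq_zero_iff_dvd]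
    tauto
  have hdisj : ∀ z ∈ base, z ∉ extras := by
    intro z hz hze
    exact ((hmem_extras z).1 hze).2.2.2 ((hmem_base z).1 hz).2.2
  have hfold :
      l.foldl (fun acc a =>
        if (decide (start_idx ≤ a) && decide (a ≤ end_idx)) = true then acc ++ [a] else acc) base
      = base ++ (l.filter (fun a => decide (start_idx ≤ a) && decide (a ≤ end_idx))).map (fun a => a) := by
    exact PySem.List.foldl_append_if _ (fun a => a) l base
  rw [hfold]
  apply PySem.List.sorted_eq_of_perm_of_pairwise_lt
  · rw [List.perm_ext_iff_of_nodup
        ((pvMerge_pairwise base extras hbaseP hextrasP hdisj).imp ne_of_lt)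
        (PySem.Set.nodup_ofList _)]
    intro z
    rw [pvMerge_mem, PySem.Set.mem_ofList, List.mem_append, List.map_id', List.mem_filter]
    constructor
    · rintro (hz | hz)
      · exact Or.inl hz
      · have := (hmem_extras z).1 hz
        refine Or.inr ⟨this.1, by simp [this.2.1, this.2.2.1]⟩
    · rintro (hz | ⟨hzl, hb⟩)
      · exact Or.inl hz
      · simp only [Bool.and_eq_true, decide_eq_true_eq] at hb
        by_cases hdvd : st ∣ z - start_idx
        · exact Or.inl ((hmem_base z).2 ⟨hb.1, by omega, hdvd⟩)
        · exact Or.inr ((hmem_extras z).2 ⟨hzl, hb.1, hb.2, hdvd⟩)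
  · exact pvMerge_pairwise base extras hbaseP hextrasP hdisj

-- no-anchor case: sorted(set(base)) = base
theorem pv_base_case (start_idx end_idx step : Int) :
    PySem.List.sorted
      (PySem.Set.ofList (PySem.List.pyRange start_idx (end_idx + 1) (max 1 step))) (fun x => x)
    = PySem.List.pyRange start_idx (end_idx + 1) (max 1 step) := by
  have hst : (0 : Int) < max 1 step := by positivity
  have hP := pyRange_pairwise_lt_of_pos start_idx (end_idx + 1) hst
  have h1 := PySem.Set.ofList_eq_self_of_nodup _ (hP.imp ne_of_lt)
  rw [h1]
  exact PySem.List.sorted_eq_of_perm_of_pairwise_lt _ _ _ (List.Perm.refl _) hP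

-- ===== VERDICT (by name: the statement is the Claim_ definition above) =====
theorem sample_indices_py_spec : Claim_equal_sample_indices_py := by
  intro start_idx end_idx step anchors _
  unfold Spec_sample_indices_py sample_indices_py sample_indices_py_alt
  by_cases hlt : end_idx < start_idx
  · simp [hlt]
  · simp only [if_neg hlt]
    match anchors with
    | none =>
      simp only [Option.getD_none, List.filter_nil]
      rw [show PySem.List.sorted ((PySem.Set.ofList ([] : List Int)).filter
        (fun a => !(PySem.Int.mod (a - start_idx) (max 1 step) == 0))) (fun x => x) = [] from rfl]
      simp only [List.foldl_nil, List.nil_append]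
      rw [PySem.List.slice_from _ le_rfl]
      simpa using pv_base_case start_idx end_idx step
    | some l =>
      by_cases hl : l = []
      · subst hl
        simp only [Option.getD_some, List.filter_nil]
        rw [show PySem.List.sorted ((PySem.Set.ofList ([] : List Int)).filter
          (fun a => !(PySem.Int.mod (a - start_idx) (max 1 step) == 0))) (fun x => x) = [] from rfl]
        simp only [List.foldl_nil, List.nil_append]
        rw [PySem.List.slice_from _ le_rfl]
        simpa using pv_base_case start_idx end_idx step
      · simp only [if_neg hl, Option.getD_some]
        rw [pv_extras_eq start_idx end_idx (max 1 step) l]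
        rw [pv_merge_form start_idx end_idx step l]
        exact pv_main start_idx end_idx step l
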